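-- pv_equiv track=rewrite | github.com/danrasband/coding-experiment-reviews | responses/9CKBRD-ZZ8/find_maximum_product.py | solution
-- ===== SOURCE A (Python) =====
-- from collections import defaultdict
--
-- def solution(A):
--
--     prefix_dict = defaultdict(int)
--
--     for string in A:
--         for i in range(1,len(string)):
--             prefix_dict[string[:i]] = prefix_dict[string[:i]] + 1
--
--     highest_k = ""
--     highest_v = 1
--
--     for k, v in prefix_dict.items():
--         if v > highest_v:
--             highest_k = k
--             highest_v = v
--         elif v == highest_v:
--             if len(k) > len(highest_k):
--                 highest_k = k
--                 highest_v = v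
--
--     if highest_v <= 1:
--         highest_k = ""
--
--
--     return highest_k
-- ===== SOURCE B (Python) =====
-- from collections import Counter
--
--
-- def solution(A):
--     # Length-by-length sweep: for each prefix length i, count the length-i
--     # prefixes in one Counter round and fold the round winner into a running
--     # best; longer rounds come later, so an equal count replaces the best.
--     max_len = max((len(s) for s in A), default=0)
--     best_k, best_v = "", 0
--     for i in range(1, max_len):
--         cnt = Counter(s[:i] for s in A if len(s) > i)
--         k, v = max(cnt.items(), key=lambda kv: kv[1])
--         if v >= best_v:
--             best_k, best_v = k, v
--     return best_k if best_v >= 2 else ""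
-- ===== Notes on version B (the rewrite author's own statement) =====
-- stated objective: alternative
-- what changed: B transposes the loops: instead of building one global dict of all proper prefixes and then scanning its items with an explicit best-tracking branch chain, B sweeps prefix lengths in increasing order, counts the length-i prefixes of the still-long-enough strings in one Counter round, takes each round's first maximal entry with max(key=...), and folds it into a running best where an equal count (being longer) replaces it; no global dict is ever materialized.
import Mathlib
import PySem

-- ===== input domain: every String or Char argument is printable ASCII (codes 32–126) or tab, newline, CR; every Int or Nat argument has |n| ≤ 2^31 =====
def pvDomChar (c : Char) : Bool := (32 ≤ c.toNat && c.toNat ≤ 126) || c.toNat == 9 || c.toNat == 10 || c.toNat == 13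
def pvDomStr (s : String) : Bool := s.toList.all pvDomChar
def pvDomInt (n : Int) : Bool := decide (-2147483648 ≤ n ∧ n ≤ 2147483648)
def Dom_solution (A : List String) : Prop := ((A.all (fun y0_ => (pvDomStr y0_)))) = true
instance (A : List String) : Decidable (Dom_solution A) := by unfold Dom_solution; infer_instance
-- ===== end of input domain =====

-- B restructures A's single global prefix dict + item scan into a length-by-length
-- sweep with one Counter round per prefix length and an online running best
-- (objective: alternative decomposition, same asymptotic cost).

-- ===== PORT A =====
def solution (A : List String) : String :=
  let d : PySem.Dict String Int :=
    A.foldl (fun d s =>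
      (PySem.List.pyRange 1 (PySem.Str.len s) 1).foldl (fun d i =>
        d.insert (PySem.Str.slice s none (some i))
          (d.getD (PySem.Str.slice s none (some i)) 0 + 1)) d)
      PySem.Dict.empty
  let r : String × Int :=
    d.items.foldl (fun b kv =>
      if kv.2 > b.2 then kv
      else if kv.2 = b.2 then (if PySem.Str.len kv.1 > PySem.Str.len b.1 then kv else b)
      else b) ("", 1)
  if r.2 ≤ 1 then "" else r.1

-- ===== PORT B =====
def solution_alt (A : List String) : String :=
  let maxLen : Int := (PySem.List.max? (A.map PySem.Str.len) (fun x => x)).getD 0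
  let r : String × Int :=
    (PySem.List.pyRange 1 maxLen 1).foldl (fun b i =>
      let cnt := PySem.Dict.counter
        ((A.filter (fun s => decide (i < PySem.Str.len s))).map
          (fun s => PySem.Str.slice s none (some i)))
      match PySem.List.max? cnt.items (fun kv => kv.2) with
      | some kv => if b.2 ≤ kv.2 then kv else b
      | none => b) ("", 0)
  if 2 ≤ r.2 then r.1 else ""

-- ===== PRECONDITION & SPEC =====
def Spec_solution (A : List String) (out : String) : Prop := out = solution_alt A
instance (A : List String) (out : String) : Decidable (Spec_solution A out) := by unfold Spec_solution; infer_instance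

-- ===== CLAIM (what is proved, stated in full; the proofs are below) =====
def Claim_equal_solution : Prop := ∀ (A : List String), Dom_solution A → Spec_solution A (solution A)

-- ===== LEMMAS AND PROOFS =====

-- length of a string as a Nat
def lenN (s : String) : Nat := s.toList.length

-- the (count, length) key A's scan maximizes lexicographically
def kappa (e : String × Int) : Int ×ₗ Int := toLex (e.2, (lenN e.1 : Int))

-- generic "keep the first extremal element" scan, and the running max of keys
def gscan {α K : Type} [LinearOrder K] (key : α → K) (l : List α) (b : α) : α :=
  l.foldl (fun a y => if key a < key y then y else a) b

def gmax {α K : Type} [LinearOrder K] (key : α → K) (l : List α) (c : K) : K :=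
  l.foldl (fun m y => max m (key y)) c

-- the "achieves key value M" test, with one fixed BEq instance
def pOf {α K : Type} [LinearOrder K] (key : α → K) (M : K) : α → Bool :=
  fun e => decide (key e = M)

-- the list of proper prefixes of s, shortest first
def prefListN (s : String) : List String :=
  (List.range (lenN s - 1)).map (fun k => PySem.Str.slice s none (some ((k + 1 : Nat) : Int)))

-- all proper prefixes of all strings of A, in A's traversal order
def PA (A : List String) : List String := A.flatMap prefListN

-- the items list of Counter(l): distinct elements in first-occurrence order with counts
def itemsOf (l : List String) : List (String × Int) :=
  (PySem.Set.ofList l).map (fun k => (k, (l.count k : Int)))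

-- the length-L round of B: length-L prefixes of all long-enough strings
def roundL (A : List String) (L : Nat) : List String :=
  (A.filter (fun s => decide (((L : Nat) : Int) < PySem.Str.len s))).map
    (fun s => PySem.Str.slice s none (some ((L : Nat) : Int)))

def mN (A : List String) : Nat :=
  ((PySem.List.max? (A.map PySem.Str.len) (fun x => x)).getD 0).toNat

-- B's stream of round items, concatenated
def concatB (A : List String) : List (String × Int) :=
  (List.range (mN A - 1)).map (fun k => itemsOf (roundL A (k + 1))) |>.flatten

-- B's round step, over a Nat length
def bstep (A : List String) (b : String × Int) (L : Nat) : String × Int :=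
  match PySem.List.max? (itemsOf (roundL A L)) (fun kv => kv.2) with
  | some kv => if b.2 ≤ kv.2 then kv else b
  | none => b

lemma pyRange_one (n : Int) :
    PySem.List.pyRange 1 n 1 = (List.range (n - 1).toNat).map (fun k => ((k + 1 : Nat) : Int)) := by
  unfold PySem.List.pyRange
  simp only [if_neg one_ne_zero]
  norm_num
  rw [show (if 1 < n then n.toNat - 1 else 0) = n.toNat - 1 by split_ifs <;> omega]
  apply List.map_congr_left
  intro k _
  push_cast [add_comm]
  rfl

lemma strLen_eq (s : String) : PySem.Str.len s = (lenN s : Int) := rfl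

lemma lenN_slice (s : String) (L : Nat) (h : L ≤ lenN s) :
    lenN (PySem.Str.slice s none (some (L : Int))) = L := by
  unfold lenN at *
  rw [PySem.Str.toList_slice]
  simp only [PySem.Chars.slice_eq_listSlice, PySem.List.slice_to_natCast]
  simp only [List.length_take]
  omega

lemma prefList_eq (s : String) :
    (PySem.List.pyRange 1 (PySem.Str.len s) 1).map (fun i => PySem.Str.slice s none (some i))
      = prefListN s := by
  rw [strLen_eq, pyRange_one]
  rw [show ((lenN s : Int) - 1).toNat = lenN s - 1 by omega]
  rw [List.map_map]
  rfl

lemma mem_prefListN {p s : String} (h : p ∈ prefListN s) : 1 ≤ lenN p ∧ lenN p < lenN s := by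
  unfold prefListN at h
  rw [List.mem_map] at h
  obtain ⟨k, hk, rfl⟩ := h
  rw [List.mem_range] at hk
  rw [lenN_slice s (k + 1) (by omega)]
  omega

lemma mem_PA {p : String} {A : List String} (h : p ∈ PA A) :
    ∃ s ∈ A, 1 ≤ lenN p ∧ lenN p < lenN s := by
  unfold PA at h
  rw [List.mem_flatMap] at h
  obtain ⟨s, hs, hp⟩ := h
  exact ⟨s, hs, mem_prefListN hp⟩

lemma len_le_mN {A : List String} {s : String} (hs : s ∈ A) : lenN s ≤ mN A := by
  unfold mN
  cases hm : PySem.List.max? (A.map PySem.Str.len) (fun x => x) with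
  | none =>
    rw [PySem.List.max?_eq_none_iff] at hm
    simp only [List.map_eq_nil_iff] at hm
    subst hm; simp at hs
  | some m =>
    have := PySem.List.max?_isMax hm (PySem.Str.len s) (List.mem_map_of_mem hs)
    rw [strLen_eq] at this
    simp only [Option.getD_some]
    omega

lemma mem_itemsOf {l : List String} {e : String × Int} (h : e ∈ itemsOf l) :
    e.1 ∈ l ∧ e.2 = (l.count e.1 : Int) ∧ 1 ≤ e.2 := by
  unfold itemsOf at h
  rw [List.mem_map] at h
  obtain ⟨k, hk, rfl⟩ := h
  rw [PySem.Set.mem_ofList] at hk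
  have hc : 0 < l.count k := List.count_pos_iff.mpr hk
  refine ⟨hk, rfl, ?_⟩
  show (1 : Int) ≤ (l.count k : Int)
  exact_mod_cast hc

lemma itemsOf_eq (l : List String) : (PySem.Dict.counter l).items = itemsOf l := by
  rw [PySem.Dict.items_counter]
  rfl

lemma gmax_cons {α K : Type} [LinearOrder K] (key : α → K) (x : α) (t : List α) (c : K) :
    gmax key (x :: t) c = gmax key t (max c (key x)) := rfl

lemma gmax_le {α K : Type} [LinearOrder K] (key : α → K) :
    ∀ (l : List α) (c : K), c ≤ gmax key l c ∧ ∀ e ∈ l, key e ≤ gmax key l c := by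
  intro l
  induction l with
  | nil => intro c; exact ⟨le_refl c, by simp⟩
  | cons x t ih =>
    intro c
    rw [gmax_cons]
    obtain ⟨h1, h2⟩ := ih (max c (key x))
    refine ⟨le_trans (le_max_left _ _) h1, ?_⟩
    intro e he
    rcases List.mem_cons.mp he with rfl | he
    · exact le_trans (le_max_right _ _) h1
    · exact h2 e he

lemma gmax_attained {α K : Type} [LinearOrder K] (key : α → K) :
    ∀ (l : List α) (c : K), gmax key l c = c ∨ ∃ e ∈ l, key e = gmax key l c := by
  intro l
  induction l with
  | nil => intro c; exact Or.inl rfl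
  | cons x t ih =>
    intro c
    rw [gmax_cons]
    rcases ih (max c (key x)) with h | ⟨e, he, hke⟩
    · rw [h]
      rcases max_choice c (key x) with hm | hm
      · exact Or.inl hm
      · exact Or.inr ⟨x, List.mem_cons_self, hm.symm⟩
    · exact Or.inr ⟨e, List.mem_cons_of_mem _ he, hke⟩

lemma gmax_perm {α K : Type} [LinearOrder K] (key : α → K) {l₁ l₂ : List α}
    (p : l₁.Perm l₂) : ∀ c, gmax key l₁ c = gmax key l₂ c := by
  induction p with
  | nil => intro c; rfl
  | cons x p ih => intro c; rw [gmax_cons, gmax_cons, ih]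
  | swap x y l =>
    intro c
    rw [gmax_cons, gmax_cons, gmax_cons, gmax_cons, max_right_comm]
  | trans p q ih1 ih2 => intro c; rw [ih1, ih2]

lemma gmax_init_eq {α K : Type} [LinearOrder K] (key : α → K) {l : List α} (hne : l ≠ [])
    {c₁ c₂ : K} (h₁ : ∀ e ∈ l, c₁ ≤ key e) (h₂ : ∀ e ∈ l, c₂ ≤ key e) :
    gmax key l c₁ = gmax key l c₂ := by
  cases l with
  | nil => exact absurd rfl hne
  | cons x t =>
    rw [gmax_cons, gmax_cons,
      max_eq_right (h₁ x List.mem_cons_self), max_eq_right (h₂ x List.mem_cons_self)]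

-- first-argmax characterization of the scan
lemma gscan_spec {α K : Type} [LinearOrder K] (key : α → K) :
    ∀ (l : List α) (b : α),
      ((b :: l).filter (pOf key (gmax key l (key b)))).head? = some (gscan key l b) := by
  intro l
  induction l with
  | nil => intro b; simp [gmax, gscan, pOf]
  | cons e t ih =>
    intro b
    have hstep : key (if key b < key e then e else b) = max (key b) (key e) := by
      split_ifs with h
      · exact (max_eq_right (le_of_lt h)).symm
      · exact (max_eq_left (not_lt.mp h)).symm
    have hM : gmax key (e :: t) (key b) = gmax key t (key (if key b < key e then e else b)) := by
      rw [gmax_cons, hstep]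
    have hRHS := ih (if key b < key e then e else b)
    rw [hM]
    have hub := gmax_le key t (key (if key b < key e then e else b))
    set M := gmax key t (key (if key b < key e then e else b)) with hMdef
    by_cases hbe : key b < key e
    · -- step is e; b cannot match M
      have hbM : key b < M := lt_of_lt_of_le hbe (le_trans (le_max_right (key b) (key e)) (by
        rw [hstep] at hub; exact hub.1))
      have hbne : pOf key M b = false := by
        simp only [pOf]; exact beq_eq_false_iff_ne.mpr (ne_of_lt hbM)
      have h1 : gscan key (e :: t) b = gscan key t e := by simp [gscan, hbe]
      rw [h1, List.filter_cons, hbne]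
      simp only [Bool.false_eq_true, if_false]
      simpa [hbe] using hRHS
    · -- step is b
      have hkeb : key e ≤ key b := not_lt.mp hbe
      have hbub : key b ≤ M := by
        rw [hstep] at hub
        exact le_trans (le_max_left (key b) (key e)) hub.1
      have h1 : gscan key (e :: t) b = gscan key t b := by simp [gscan, hbe]
      rw [h1]
      simp only [if_neg hbe] at hRHS
      by_cases hbM : key b = M
      · have hbt : pOf key M b = true := by
          simp only [pOf]; exact decide_eq_true hbM
        have h2 : gscan key t b = b := by
          rw [List.filter_cons, hbt] at hRHS
          simp only [if_true] at hRHS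
          simpa using hRHS.symm
        rw [List.filter_cons, hbt]
        simp [h2]
      · have hblt : key b < M := lt_of_le_of_ne hbub hbM
        have hbne : pOf key M b = false := by
          simp only [pOf]; exact decide_eq_false hbM
        have heM : key e < M := lt_of_le_of_lt hkeb hblt
        have hene : pOf key M e = false := by
          simp only [pOf]; exact decide_eq_false (ne_of_lt heM)
        rw [List.filter_cons, hbne] at hRHS
        simp only [Bool.false_eq_true, if_false] at hRHS
        rw [List.filter_cons, hbne, List.filter_cons, hene]
        simpa using hRHS

lemma gscan_mem {α K : Type} [LinearOrder K] (key : α → K) (l : List α) (b : α) :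
    gscan key l b ∈ b :: l := by
  have h := gscan_spec key l b
  have hmem : gscan key l b ∈ (b :: l).filter (pOf key (gmax key l (key b))) := by
    rcases List.head?_eq_some_iff.mp h with ⟨t, ht⟩
    rw [ht]; exact List.mem_cons_self
  exact List.mem_of_mem_filter hmem

lemma max?_eq_gscan {α : Type} (key : α → Int) (x : α) (t : List α) :
    PySem.List.max? (x :: t) key = some (gscan key t x) := by
  show List.foldl _ none (x :: t) = _
  rw [List.foldl_cons]
  show List.foldl _ (some x) t = _
  induction t generalizing x with
  | nil => rfl
  | cons y t ih =>
    rw [List.foldl_cons]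
    show List.foldl _ (if key x < key y then some y else some x) t = _
    rw [← apply_ite Option.some, ih]
    rfl

lemma ofList_filter (p : String → Bool) :
    ∀ (l : List String) (s : PySem.Set String),
      (l.foldl PySem.Set.add s).filter p = (l.filter p).foldl PySem.Set.add (s.filter p) := by
  intro l
  induction l with
  | nil => intro s; rfl
  | cons x t ih =>
    intro s
    have hadd : (PySem.Set.add s x).filter p =
        (if p x then PySem.Set.add (s.filter p) x else s.filter p) := by
      unfold PySem.Set.add PySem.Set.contains
      by_cases hm : x ∈ s
      · rw [if_pos (by simpa using hm)]
        by_cases hp : p x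
        · rw [if_pos hp, if_pos (by simp [List.mem_filter, hm, hp])]
        · rw [if_neg hp]
      · rw [if_neg (by simpa using hm)]
        by_cases hp : p x
        · rw [if_pos hp, if_neg (by simp [List.mem_filter, hm]), List.filter_append]
          simp [hp]
        · rw [if_neg hp, List.filter_append]
          simp [hp]
    rw [List.foldl_cons, ih, hadd, List.filter_cons]
    by_cases hp : p x <;> simp [hp]

lemma filter_range_single (n j : Nat) :
    (List.range n).filter (fun k => k == j) = if j < n then [j] else [] := by
  induction n with
  | zero => simp
  | succ n ih =>
    rw [List.range_succ, List.filter_append, ih]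
    by_cases h : j < n
    · rw [if_pos h, if_pos (by omega)]
      have : (n == j) = false := by simp; omega
      simp [this]
    · rw [if_neg h]
      by_cases h2 : j < n + 1
      · have hj : n = j := by omega
        rw [if_pos h2]
        simp [hj]
      · have : (n == j) = false := by simp; omega
        rw [if_neg h2]
        simp [this]

lemma flatten_single {α : Type} (g : Nat → List α) (j : Nat) :
    ∀ n, (List.flatten ((List.range n).map (fun k => if k = j then g k else []))) =
      if j < n then g j else [] := by
  intro n
  induction n with
  | zero => simp
  | succ n ih =>
    rw [List.range_succ, List.map_append, List.flatten_append, ih]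
    by_cases h : j < n
    · rw [if_pos h, if_pos (by omega)]
      have : ¬ (n = j) := by omega
      simp [this]
    · rw [if_neg h]
      by_cases h2 : j < n + 1
      · have hj : n = j := by omega
        rw [if_pos h2]
        simp [hj]
      · have : ¬ (n = j) := by omega
        rw [if_neg h2]
        simp [this]

lemma map_filter_eq_flatMap {α β : Type} (p : α → Bool) (f : α → β) (l : List α) :
    (l.filter p).map f = l.flatMap (fun x => if p x then [f x] else []) := by
  induction l with
  | nil => rfl
  | cons x t ih =>
    rw [List.filter_cons, List.flatMap_cons]
    by_cases hp : p x <;> simp [hp, ih]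

lemma PA_filter (A : List String) (L : Nat) (hL : 1 ≤ L) :
    (PA A).filter (fun q => lenN q == L) = roundL A L := by
  unfold PA roundL
  rw [List.filter_flatMap, map_filter_eq_flatMap]
  congr 1
  funext s
  unfold prefListN
  rw [List.filter_map]
  have hfil : (List.range (lenN s - 1)).filter
      ((fun q => lenN q == L) ∘ (fun k => PySem.Str.slice s none (some ((k + 1 : Nat) : Int))))
      = (List.range (lenN s - 1)).filter (fun k => k == L - 1) := by
    apply List.filter_congr
    intro k hk
    rw [List.mem_range] at hk
    simp only [Function.comp]
    rw [lenN_slice s (k + 1) (by omega)]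
    rw [Bool.eq_iff_iff]
    simp only [beq_iff_eq]
    omega
  rw [hfil, filter_range_single]
  by_cases hc : L - 1 < lenN s - 1
  · rw [if_pos hc]
    rw [if_pos (show decide (((L : Nat) : Int) < PySem.Str.len s) = true by
      rw [decide_eq_true_iff, strLen_eq]; exact_mod_cast (show L < lenN s by omega))]
    simp only [List.map_cons, List.map_nil]
    rw [show L - 1 + 1 = L by omega]
  · rw [if_neg hc]
    rw [if_neg (show ¬ (decide (((L : Nat) : Int) < PySem.Str.len s) = true) by
      rw [decide_eq_true_iff, strLen_eq]
      intro hlt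
      have : L < lenN s := by exact_mod_cast hlt
      omega)]
    rfl

lemma mem_roundL {A : List String} {L : Nat} {q : String} (h : q ∈ roundL A L) : lenN q = L := by
  unfold roundL at h
  rw [List.mem_map] at h
  obtain ⟨s, hs, rfl⟩ := h
  have hlt := (List.mem_filter.mp hs).2
  rw [decide_eq_true_iff, strLen_eq] at hlt
  exact lenN_slice s L (by exact_mod_cast le_of_lt hlt)

-- the per-length slice of A's items equals the corresponding round's items
lemma flE (A : List String) (L : Nat) (hL : 1 ≤ L) :
    (itemsOf (PA A)).filter (fun e => lenN e.1 == L) = itemsOf (roundL A L) := by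
  unfold itemsOf
  rw [List.filter_map]
  have h2 : (PySem.Set.ofList (PA A)).filter
      ((fun e : String × Int => lenN e.1 == L) ∘ (fun k => (k, ((PA A).count k : Int))))
      = PySem.Set.ofList ((PA A).filter (fun q => lenN q == L)) := by
    show (PySem.Set.ofList (PA A)).filter (fun q => lenN q == L) = _
    unfold PySem.Set.ofList
    rw [ofList_filter]
    rfl
  rw [h2, PA_filter A L hL]
  apply List.map_congr_left
  intro k hk
  rw [PySem.Set.mem_ofList] at hk
  have hlen : lenN k = L := mem_roundL hk
  have hcnt : (PA A).count k = (roundL A L).count k := by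
    rw [← PA_filter A L hL]
    exact (List.count_filter (by simp [hlen])).symm
  rw [hcnt]

-- per-length slices of A's item list and B's round stream agree
lemma flEq (A : List String) (L : Nat) :
    (itemsOf (PA A)).filter (fun e => lenN e.1 == L)
      = (concatB A).filter (fun e => lenN e.1 == L) := by
  unfold concatB
  rw [← List.flatMap_def, List.filter_flatMap]
  by_cases hL : 1 ≤ L
  · have hper : ∀ k : Nat, (itemsOf (roundL A (k + 1))).filter (fun e => lenN e.1 == L)
        = if k = L - 1 then itemsOf (roundL A (k + 1)) else [] := by
      intro k
      by_cases hk : k = L - 1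
      · rw [if_pos hk]
        apply List.filter_eq_self.mpr
        intro e he
        have h1 := mem_roundL (mem_itemsOf he).1
        rw [beq_iff_eq, h1]
        omega
      · rw [if_neg hk]
        apply List.filter_eq_nil_iff.mpr
        intro e he
        have h1 := mem_roundL (mem_itemsOf he).1
        simp only [beq_iff_eq, h1]
        omega
    rw [List.flatMap_def]
    rw [List.map_congr_left (fun k _ => hper k), flatten_single]
    by_cases hc : L - 1 < mN A - 1
    · rw [if_pos hc, show L - 1 + 1 = L by omega]
      exact flE A L hL
    · rw [if_neg hc]
      apply List.filter_eq_nil_iff.mpr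
      intro e he
      obtain ⟨s, hs, h1, h2⟩ := mem_PA (mem_itemsOf he).1
      simp only [beq_iff_eq]
      have h3 := len_le_mN hs
      omega
  · have hL0 : L = 0 := by omega
    subst hL0
    have hleft : (itemsOf (PA A)).filter (fun e => lenN e.1 == 0) = [] := by
      apply List.filter_eq_nil_iff.mpr
      intro e he
      obtain ⟨s, hs, h1, h2⟩ := mem_PA (mem_itemsOf he).1
      simp only [beq_iff_eq]
      omega
    have hright : ∀ k : Nat, (itemsOf (roundL A (k + 1))).filter (fun e => lenN e.1 == 0) = [] := by
      intro k
      apply List.filter_eq_nil_iff.mpr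
      intro e he
      have h1 := mem_roundL (mem_itemsOf he).1
      simp only [beq_iff_eq, h1]
      omega
    rw [hleft]
    rw [show (fun k : Nat => (itemsOf (roundL A (k + 1))).filter (fun e => lenN e.1 == 0))
        = (fun _ : Nat => ([] : List (String × Int))) from funext hright]
    simp

lemma perm_EC (A : List String) : (itemsOf (PA A)).Perm (concatB A) := by
  rw [List.perm_iff_count]
  intro x
  have hx : (fun e : String × Int => lenN e.1 == lenN x.1) x = true := by simp
  rw [← List.count_filter (p := fun e : String × Int => lenN e.1 == lenN x.1)
      (l := itemsOf (PA A)) hx, flEq A (lenN x.1),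
    List.count_filter (p := fun e : String × Int => lenN e.1 == lenN x.1)
      (l := concatB A) hx]

-- lifting the count-max of a fixed-length round to the lexicographic key
lemma gmax_lift (LI : Int) :
    ∀ (l : List (String × Int)), (∀ e ∈ l, (lenN e.1 : Int) = LI) →
      ∀ (c : Int ×ₗ Int) (v : Int),
        gmax kappa l (max c (toLex (v, LI))) = max c (toLex (gmax (fun e : String × Int => e.2) l v, LI)) := by
  intro l
  induction l with
  | nil => intro _ c v; rfl
  | cons e t ih =>
    intro hlen c v
    have hκe : kappa e = toLex (e.2, LI) := by
      unfold kappa; rw [hlen e List.mem_cons_self]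
    have hmm : max (toLex ((v : Int), LI)) (toLex (e.2, LI)) = toLex (max v e.2, LI) := by
      rcases le_total v e.2 with h | h
      · rw [max_eq_right (Prod.Lex.toLex_le_toLex.mpr (by
          rcases lt_or_eq_of_le h with h' | h'
          · exact Or.inl h'
          · exact Or.inr ⟨h', le_refl _⟩)), max_eq_right h]
      · rw [max_eq_left (Prod.Lex.toLex_le_toLex.mpr (by
          rcases lt_or_eq_of_le h with h' | h'
          · exact Or.inl h'
          · exact Or.inr ⟨h', le_refl _⟩)), max_eq_left h]
    rw [gmax_cons, hκe, max_assoc, hmm,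
      ih (fun x hx => hlen x (List.mem_cons_of_mem _ hx)) c (max v e.2)]
    rfl

-- one round of B is the κ-scan of that round's items
lemma roundCore (l : List (String × Int)) (L : Nat) (_hL : 1 ≤ L)
    (hlen : ∀ e ∈ l, lenN e.1 = L) (b : String × Int) (hb : lenN b.1 < L) :
    (match PySem.List.max? l (fun kv => kv.2) with
     | some kv => if b.2 ≤ kv.2 then kv else b
     | none => b) = gscan kappa l b := by
  cases l with
  | nil => rfl
  | cons x t =>
    rw [max?_eq_gscan]
    set m := gscan (fun kv : String × Int => kv.2) t x with hm
    have hcnt := gscan_spec (fun kv : String × Int => kv.2) t x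
    have hkap := gscan_spec kappa (x :: t) b
    set Mc := gmax (fun kv : String × Int => kv.2) t x.2 with hMc
    have hm2 : m.2 = Mc := by
      have hmem : m ∈ (x :: t).filter (pOf (fun kv : String × Int => kv.2) Mc) := by
        rcases List.head?_eq_some_iff.mp hcnt with ⟨r, hr⟩
        rw [hr]; exact List.mem_cons_self
      have hp := (List.mem_filter.mp hmem).2
      simp only [pOf] at hp
      exact of_decide_eq_true hp
    have hκx : kappa x = toLex (x.2, (L : Int)) := by
      unfold kappa; rw [hlen x List.mem_cons_self]
    have hMκ : gmax kappa (x :: t) (kappa b) = max (kappa b) (toLex (Mc, (L : Int))) := by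
      rw [gmax_cons, hκx]
      exact gmax_lift (L : Int) t
        (fun e he => by rw [hlen e (List.mem_cons_of_mem _ he)]) (kappa b) x.2
    have hbκ : kappa b = toLex (b.2, (lenN b.1 : Int)) := rfl
    by_cases hc : b.2 ≤ Mc
    · have hlt : kappa b < toLex (Mc, (L : Int)) := by
        rw [hbκ, Prod.Lex.toLex_lt_toLex]
        rcases lt_or_eq_of_le hc with h' | h'
        · exact Or.inl h'
        · refine Or.inr ⟨h', ?_⟩
          show (lenN b.1 : Int) < (L : Int)
          exact_mod_cast hb
      have hMax : gmax kappa (x :: t) (kappa b) = toLex (Mc, (L : Int)) := by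
        rw [hMκ, max_eq_right (le_of_lt hlt)]
      show (if b.2 ≤ m.2 then m else b) = _
      rw [if_pos (by rw [hm2]; exact hc)]
      rw [hMax] at hkap
      have hbf : pOf kappa (toLex (Mc, (L : Int))) b = false := by
        simp only [pOf]; exact decide_eq_false (ne_of_lt hlt)
      rw [List.filter_cons, hbf] at hkap
      simp only [Bool.false_eq_true, if_false] at hkap
      have hfe : (x :: t).filter (pOf kappa (toLex (Mc, (L : Int))))
          = (x :: t).filter (pOf (fun kv : String × Int => kv.2) Mc) := by
        apply List.filter_congr
        intro e he
        simp only [pOf]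
        unfold kappa
        rw [hlen e he, decide_eq_decide]
        simp [Prod.ext_iff]
      rw [hfe, hcnt] at hkap
      exact Option.some.inj hkap
    · rw [not_le] at hc
      have hlt : toLex (Mc, (L : Int)) < kappa b := by
        rw [hbκ, Prod.Lex.toLex_lt_toLex]
        exact Or.inl hc
      have hMax : gmax kappa (x :: t) (kappa b) = kappa b := by
        rw [hMκ, max_eq_left (le_of_lt hlt)]
      show (if b.2 ≤ m.2 then m else b) = _
      rw [if_neg (by rw [hm2]; omega)]
      rw [hMax] at hkap
      have hbt : pOf kappa (kappa b) b = true := by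
        simp only [pOf, decide_eq_true_eq]
      rw [List.filter_cons, hbt] at hkap
      simp only [if_true] at hkap
      simpa using hkap

lemma roundsFold (A : List String) :
    ∀ (ks : List Nat) (b : String × Int), ks.Pairwise (· < ·) →
      (∀ L ∈ ks, 1 ≤ L ∧ lenN b.1 < L) →
      ks.foldl (bstep A) b
        = gscan kappa (List.flatten (ks.map (fun L => itemsOf (roundL A L)))) b := by
  intro ks
  induction ks with
  | nil => intro b _ _; rfl
  | cons L ks ih =>
    intro b hpw hmem
    rw [List.foldl_cons, List.map_cons, List.flatten_cons]
    have h1 : bstep A b L = gscan kappa (itemsOf (roundL A L)) b := by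
      apply roundCore _ L (hmem L List.mem_cons_self).1
      · intro e he; exact mem_roundL (mem_itemsOf he).1
      · exact (hmem L List.mem_cons_self).2
    have happ : gscan kappa (itemsOf (roundL A L) ++
        List.flatten (ks.map (fun L => itemsOf (roundL A L)))) b
        = gscan kappa (List.flatten (ks.map (fun L => itemsOf (roundL A L))))
            (gscan kappa (itemsOf (roundL A L)) b) := by
      unfold gscan
      rw [List.foldl_append]
    rw [happ, h1]
    apply ih
    · exact List.Pairwise.of_cons hpw
    · intro L2 hL2
      refine ⟨(hmem L2 (List.mem_cons_of_mem _ hL2)).1, ?_⟩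
      have hLL2 : L < L2 := (List.pairwise_cons.mp hpw).1 L2 hL2
      rcases List.mem_cons.mp (gscan_mem kappa (itemsOf (roundL A L)) b) with h | h
      · rw [h]
        exact lt_trans (hmem L List.mem_cons_self).2 hLL2
      · rw [mem_roundL (mem_itemsOf h).1]
        exact hLL2

lemma reduceA (A : List String) :
    solution A =
      (let r := gscan kappa (itemsOf (PA A)) ("", 1); if r.2 ≤ 1 then "" else r.1) := by
  have h1 : ∀ (d : PySem.Dict String Int) (s : String),
      (PySem.List.pyRange 1 (PySem.Str.len s) 1).foldl (fun d i =>
        d.insert (PySem.Str.slice s none (some i))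
          (d.getD (PySem.Str.slice s none (some i)) 0 + 1)) d
      = (prefListN s).foldl (fun d p => d.insert p (d.getD p 0 + 1)) d := by
    intro d s
    rw [← prefList_eq s, List.foldl_map]
  have hstep : (fun (b kv : String × Int) =>
      if kv.2 > b.2 then kv
      else if kv.2 = b.2 then (if PySem.Str.len kv.1 > PySem.Str.len b.1 then kv else b)
      else b) = (fun (a y : String × Int) => if kappa a < kappa y then y else a) := by
    funext b kv
    simp only [kappa, Prod.Lex.toLex_lt_toLex, gt_iff_lt]
    by_cases hc1 : b.2 < kv.2
    · rw [if_pos hc1, if_pos (Or.inl hc1)]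
    · rw [if_neg hc1]
      by_cases hc2 : kv.2 = b.2
      · rw [if_pos hc2]
        by_cases hc3 : PySem.Str.len b.1 < PySem.Str.len kv.1
        · rw [if_pos hc3, if_pos (Or.inr ⟨hc2.symm, hc3⟩)]
        · rw [if_neg hc3, if_neg (by
            rintro (h | ⟨_, h⟩)
            · exact hc1 h
            · exact hc3 h)]
      · rw [if_neg hc2, if_neg (by
          rintro (h | ⟨h, _⟩)
          · exact hc1 h
          · exact hc2 h.symm)]
  have key : (A.foldl (fun d s =>
      (PySem.List.pyRange 1 (PySem.Str.len s) 1).foldl (fun d i =>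
        d.insert (PySem.Str.slice s none (some i))
          (d.getD (PySem.Str.slice s none (some i)) 0 + 1)) d)
      PySem.Dict.empty).items.foldl (fun b kv =>
        if kv.2 > b.2 then kv
        else if kv.2 = b.2 then (if PySem.Str.len kv.1 > PySem.Str.len b.1 then kv else b)
        else b) ("", 1) = gscan kappa (itemsOf (PA A)) ("", 1) := by
    rw [show (fun (d : PySem.Dict String Int) (s : String) =>
        (PySem.List.pyRange 1 (PySem.Str.len s) 1).foldl (fun d i =>
          d.insert (PySem.Str.slice s none (some i))
            (d.getD (PySem.Str.slice s none (some i)) 0 + 1)) d)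
        = (fun (d : PySem.Dict String Int) (s : String) =>
            (prefListN s).foldl (fun d p => d.insert p (d.getD p 0 + 1)) d)
      from funext fun d => funext fun s => h1 d s]
    rw [← List.foldl_flatMap]
    rw [PySem.Dict.foldl_insert_getD_add_one_eq_counter]
    rw [itemsOf_eq, hstep]
    rfl
  have hform : ∀ (x y : String × Int), x = y →
      (if x.2 ≤ 1 then ("" : String) else x.1)
        = (let r := y; if r.2 ≤ 1 then ("" : String) else r.1) := by
    intro x y h
    subst h
    rfl
  exact hform _ _ key

lemma reduceB (A : List String) :
    solution_alt A =
      (let r := gscan kappa (concatB A) ("", 0); if 2 ≤ r.2 then r.1 else "") := by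
  have key : ((PySem.List.pyRange 1
      ((PySem.List.max? (A.map PySem.Str.len) (fun x => x)).getD 0) 1).foldl (fun b i =>
        let cnt := PySem.Dict.counter
          ((A.filter (fun s => decide (i < PySem.Str.len s))).map
            (fun s => PySem.Str.slice s none (some i)))
        match PySem.List.max? cnt.items (fun kv => kv.2) with
        | some kv => if b.2 ≤ kv.2 then kv else b
        | none => b) ("", 0)) = gscan kappa (concatB A) ("", 0) := by
    rw [pyRange_one]
    rw [show (((PySem.List.max? (A.map PySem.Str.len) (fun x => x)).getD 0) - 1).toNat
        = mN A - 1 from by unfold mN; omega]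
    rw [List.foldl_map]
    have hbody : (fun (b : String × Int) (k : Nat) =>
        (let cnt := PySem.Dict.counter
            ((A.filter (fun s => decide (((k + 1 : Nat) : Int) < PySem.Str.len s))).map
              (fun s => PySem.Str.slice s none (some ((k + 1 : Nat) : Int))))
         match PySem.List.max? cnt.items (fun kv => kv.2) with
         | some kv => if b.2 ≤ kv.2 then kv else b
         | none => b)) = (fun b k => bstep A b (k + 1)) := by
      funext b k
      show (match PySem.List.max? (PySem.Dict.counter (roundL A (k + 1))).items (fun kv => kv.2) with
         | some kv => if b.2 ≤ kv.2 then kv else b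
         | none => b) = _
      rw [itemsOf_eq]
      rfl
    rw [hbody]
    rw [← List.foldl_map (f := fun k : Nat => k + 1) (g := bstep A)]
    rw [roundsFold A ((List.range (mN A - 1)).map (fun k => k + 1)) ("", 0)
      (by
        refine List.pairwise_map.mpr ?_
        exact (List.pairwise_lt_range).imp (by omega))
      (by
        intro L hL
        rcases List.mem_map.mp hL with ⟨k, _, rfl⟩
        refine ⟨by omega, ?_⟩
        show lenN "" < k + 1
        have h0 : lenN "" = 0 := rfl
        omega)]
    rw [List.map_map]
    rfl
  have hform : ∀ (x y : String × Int), x = y →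
      (if 2 ≤ x.2 then x.1 else ("" : String))
        = (let r := y; if 2 ≤ r.2 then r.1 else ("" : String)) := by
    intro x y h
    subst h
    rfl
  exact hform _ _ key

lemma final_eq (A : List String) : solution A = solution_alt A := by
  rw [reduceA, reduceB]
  show (if (gscan kappa (itemsOf (PA A)) ("", 1)).2 ≤ 1 then ""
        else (gscan kappa (itemsOf (PA A)) ("", 1)).1)
      = (if 2 ≤ (gscan kappa (concatB A) ("", 0)).2 then (gscan kappa (concatB A) ("", 0)).1
        else "")
  have hperm := perm_EC A
  by_cases hE : itemsOf (PA A) = []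
  · have hC : concatB A = [] := List.Perm.eq_nil (hE ▸ hperm).symm
    rw [hE, hC]
    norm_num [gscan]
  · have hCne : concatB A ≠ [] := by
      intro h
      exact hE (List.Perm.eq_nil (h ▸ hperm))
    have hEb : ∀ e ∈ itemsOf (PA A), toLex ((1 : Int), (1 : Int)) ≤ kappa e := by
      intro e he
      obtain ⟨hmem, -, hcnt⟩ := mem_itemsOf he
      obtain ⟨s, hs, hlen1, -⟩ := mem_PA hmem
      show toLex ((1 : Int), (1 : Int)) ≤ toLex (e.2, (lenN e.1 : Int))
      rw [Prod.Lex.toLex_le_toLex]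
      rcases lt_or_eq_of_le hcnt with h | h
      · exact Or.inl h
      · refine Or.inr ⟨h, ?_⟩
        show (1 : Int) ≤ (lenN e.1 : Int)
        exact_mod_cast hlen1
    have hCb : ∀ e ∈ concatB A, toLex ((1 : Int), (1 : Int)) ≤ kappa e := by
      intro e he
      unfold concatB at he
      rcases List.mem_flatten.mp he with ⟨l, hl, hel⟩
      rcases List.mem_map.mp hl with ⟨k, -, rfl⟩
      obtain ⟨hmem, -, hcnt⟩ := mem_itemsOf hel
      have hlen := mem_roundL hmem
      show toLex ((1 : Int), (1 : Int)) ≤ toLex (e.2, (lenN e.1 : Int))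
      rw [Prod.Lex.toLex_le_toLex, hlen]
      rcases lt_or_eq_of_le hcnt with h | h
      · exact Or.inl h
      · refine Or.inr ⟨h, ?_⟩
        show (1 : Int) ≤ ((k + 1 : Nat) : Int)
        exact_mod_cast Nat.succ_le_succ (Nat.zero_le k)
    have hlow10 : kappa ("", 1) ≤ toLex ((1 : Int), (1 : Int)) := by
      rw [show kappa ("", 1) = toLex ((1 : Int), (0 : Int)) from rfl, Prod.Lex.toLex_le_toLex]
      exact Or.inr ⟨rfl, by norm_num⟩
    have hlow00 : kappa ("", 0) ≤ toLex ((1 : Int), (1 : Int)) := by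
      rw [show kappa ("", 0) = toLex ((0 : Int), (0 : Int)) from rfl, Prod.Lex.toLex_le_toLex]
      exact Or.inl (by norm_num)
    have hM : gmax kappa (itemsOf (PA A)) (kappa ("", 1))
        = gmax kappa (concatB A) (kappa ("", 0)) := by
      calc gmax kappa (itemsOf (PA A)) (kappa ("", 1))
          = gmax kappa (itemsOf (PA A)) (kappa ("", 0)) :=
            gmax_init_eq kappa hE (fun e he => le_trans hlow10 (hEb e he))
              (fun e he => le_trans hlow00 (hEb e he))
        _ = gmax kappa (concatB A) (kappa ("", 0)) := gmax_perm kappa hperm _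
    have hub := gmax_le kappa (itemsOf (PA A)) (kappa ("", 1))
    have hatt : ∃ e ∈ itemsOf (PA A),
        kappa e = gmax kappa (itemsOf (PA A)) (kappa ("", 1)) := by
      rcases gmax_attained kappa (itemsOf (PA A)) (kappa ("", 1)) with h | h
      · exfalso
        obtain ⟨x, hx⟩ := List.exists_mem_of_ne_nil _ hE
        have h1 := hEb x hx
        have h2 := hub.2 x hx
        rw [h] at h2
        have h3 : toLex ((1 : Int), (1 : Int)) ≤ kappa ("", 1) := le_trans h1 h2
        rw [show kappa ("", 1) = toLex ((1 : Int), (0 : Int)) from rfl,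
          Prod.Lex.toLex_le_toLex] at h3
        rcases h3 with h4 | ⟨-, h4⟩ <;> norm_num at h4
      · exact h
    obtain ⟨e₀, he₀, hκ₀⟩ := hatt
    set M := gmax kappa (itemsOf (PA A)) (kappa ("", 1)) with hMdef
    have hMval : M = toLex (e₀.2, (lenN e₀.1 : Int)) := hκ₀.symm
    have hM11 : toLex ((1 : Int), (1 : Int)) ≤ M := by
      rw [← hκ₀]
      exact hEb e₀ he₀
    have hA := gscan_spec kappa (itemsOf (PA A)) ("", 1)
    have hB := gscan_spec kappa (concatB A) ("", 0)
    rw [← hMdef] at hA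
    rw [← hM] at hB
    have hinitA : pOf kappa M ("", 1) = false := by
      simp only [pOf]
      apply decide_eq_false
      intro h
      rw [← h, show kappa ("", 1) = toLex ((1 : Int), (0 : Int)) from rfl,
        Prod.Lex.toLex_le_toLex] at hM11
      rcases hM11 with h4 | ⟨-, h4⟩ <;> norm_num at h4
    have hinitB : pOf kappa M ("", 0) = false := by
      simp only [pOf]
      apply decide_eq_false
      intro h
      rw [← h, show kappa ("", 0) = toLex ((0 : Int), (0 : Int)) from rfl,
        Prod.Lex.toLex_le_toLex] at hM11
      rcases hM11 with h4 | ⟨h4, -⟩ <;> norm_num at h4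
    rw [List.filter_cons, hinitA] at hA
    simp only [Bool.false_eq_true, if_false] at hA
    rw [List.filter_cons, hinitB] at hB
    simp only [Bool.false_eq_true, if_false] at hB
    have hsplit : ∀ l : List (String × Int), l.filter (pOf kappa M)
        = (l.filter (fun e => lenN e.1 == lenN e₀.1)).filter (fun e => decide (e.2 = e₀.2)) := by
      intro l
      rw [List.filter_filter]
      apply List.filter_congr
      intro e _
      rw [Bool.eq_iff_iff]
      simp only [pOf, hMval, decide_eq_true_eq, Bool.and_eq_true, beq_iff_eq]
      unfold kappa
      constructor
      · intro h
        have h1 := toLex_inj.mp h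
        have h2 := congrArg Prod.fst h1
        have h3 := congrArg Prod.snd h1
        simp only at h2 h3
        exact ⟨h2, by exact_mod_cast h3⟩
      · rintro ⟨h1, h2⟩
        rw [h1, h2]
    rw [hsplit, flEq A (lenN e₀.1)] at hA
    rw [hsplit] at hB
    have hr : gscan kappa (itemsOf (PA A)) ("", 1) = gscan kappa (concatB A) ("", 0) :=
      Option.some.inj (hA.symm.trans hB)
    rw [hr]
    split_ifs with h1 h2 h2
    · omega
    · rfl
    · rfl
    · omega

-- ===== VERDICT (by name: the statement is the Claim_ definition above) =====
theorem solution_spec : Claim_equal_solution := by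
  intro A _
  show solution A = solution_alt A
  exact final_eq A
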